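-- pv_equiv track=rewrite | github.com/lVoidi/Tutorias-ce1101 | Recursividad/Ejercicios/ejercicios.py | reto_2_aux
-- ===== SOURCE A (Python) =====
-- def reto_2_aux(num):
--     if num == 0:
--         return True
--
--     primero = num % 10  # 100 % 10 = 0
--     segundo = (num // 10) % 10
--
--     if segundo == 0:
--         return reto_2_aux(num // 100)
--
--     if primero % segundo == 0:
--         return reto_2_aux(num // 100)
--
--     return False
-- ===== SOURCE B (Python) =====
-- def reto_2_aux(num):
--     digits = []
--     n = num
--     while n:
--         digits.append(n % 10)
--         n //= 10
--     it = iter(digits)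
--     return all(b == 0 or a % b == 0 for a, b in zip(it, it))
-- ===== Notes on version B (the rewrite author's own statement) =====
-- stated objective: alternative
-- what changed: Replaces the two-digits-at-a-time early-return recursion by a two-phase iterative version: first extract all decimal digits into a list with a single //10 loop, then pair consecutive digits with zip(it, it) and check the divisibility condition with all().
-- outside the precondition, e.g. on reto_2_aux(-13): A returns False, B does not finish within the time limit
import Mathlib
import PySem

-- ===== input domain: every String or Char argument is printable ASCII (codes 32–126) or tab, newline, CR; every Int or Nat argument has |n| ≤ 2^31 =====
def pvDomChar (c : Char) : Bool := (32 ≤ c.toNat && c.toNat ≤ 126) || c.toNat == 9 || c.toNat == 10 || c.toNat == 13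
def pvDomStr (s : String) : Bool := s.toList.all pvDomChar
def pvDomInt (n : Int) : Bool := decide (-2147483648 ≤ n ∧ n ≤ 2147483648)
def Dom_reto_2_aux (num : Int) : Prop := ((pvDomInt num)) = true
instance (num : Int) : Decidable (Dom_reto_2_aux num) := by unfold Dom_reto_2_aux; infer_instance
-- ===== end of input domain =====

-- B replaces A's two-digits-at-a-time early-return recursion by an iterative digit-extraction
-- pass followed by a paired-digit all() check (alternative decomposition, same cost).


-- ===== PORT A =====
-- Literal port of A; the `num < 0` guard only makes the recursion total in Lean:
-- on num < 0 the Python recursion never reaches 0 (Pre_ excludes those inputs).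
def reto_2_aux (num : Int) : Bool :=
  if num = 0 then true
  else if num < 0 then true
  else
    let primero := PySem.Int.mod num 10
    let segundo := PySem.Int.mod (PySem.Int.floordiv num 10) 10
    if segundo = 0 then reto_2_aux (PySem.Int.floordiv num 100)
    else if PySem.Int.mod primero segundo = 0 then reto_2_aux (PySem.Int.floordiv num 100)
    else false
termination_by num.toNat
decreasing_by
  all_goals
    rw [PySem.Int.floordiv_eq_ediv_of_pos (by omega : (0:Int) < 100)]
    omega

-- ===== PORT B =====
-- the `while n:` digit-extraction loop of Source B; `0 < n` (instead of `n ≠ 0`) makes it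
-- total in Lean — Python's loop never terminates for n < 0 (Pre_ excludes those inputs).
def pvDigits (n : Int) : List Int :=
  if 0 < n then PySem.Int.mod n 10 :: pvDigits (PySem.Int.floordiv n 10)
  else []
termination_by n.toNat
decreasing_by
  rw [PySem.Int.floordiv_eq_ediv_of_pos (by omega : (0:Int) < 10)]
  omega

-- `zip(it, it)` on one iterator: consecutive disjoint pairs
def pvPairs : List Int → List (Int × Int)
  | a :: b :: rest => (a, b) :: pvPairs rest
  | _ => []

def reto_2_aux_alt (num : Int) : Bool :=
  (pvPairs (pvDigits num)).all
    (fun p => p.2 == 0 || PySem.Int.mod p.1 p.2 == 0)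

-- ===== PRECONDITION & SPEC =====
-- Pre_ excludes negative inputs: there A's recursion num → num//100 never reaches 0, so A
-- either hits Python's recursion limit (RecursionError) or returns False on the way; B's
-- `while n:` loop likewise never terminates on negatives, so both behaviours are excluded.
def Pre_reto_2_aux (num : Int) : Prop := 0 ≤ num
instance (num : Int) : Decidable (Pre_reto_2_aux num) := by unfold Pre_reto_2_aux; infer_instance

def pvWitness_reto_2_aux : Int := (4812)

def Spec_reto_2_aux (num : Int) (out : Bool) : Prop := out = reto_2_aux_alt num
instance (num : Int) (out : Bool) : Decidable (Spec_reto_2_aux num out) := by unfold Spec_reto_2_aux; infer_instance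

-- ===== CLAIM (what is proved, stated in full; the proofs are below) =====
def Claim_equal_reto_2_aux : Prop := ∀ (num : Int), Dom_reto_2_aux num → Pre_reto_2_aux num → Spec_reto_2_aux num (reto_2_aux num)

-- ===== LEMMAS AND PROOFS =====

lemma pvDigits_pos (n : Int) (h : 0 < n) :
    pvDigits n = PySem.Int.mod n 10 :: pvDigits (PySem.Int.floordiv n 10) := by
  rw [pvDigits]; simp [h]

lemma pvDigits_nonpos (n : Int) (h : ¬ 0 < n) : pvDigits n = [] := by
  rw [pvDigits]; simp [h]

lemma pv_main : ∀ k : Nat, ∀ num : Int, 0 ≤ num → num.toNat = k →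
    reto_2_aux num = reto_2_aux_alt num := by
  intro k
  induction k using Nat.strong_induction_on with
  | _ k ih =>
    intro num hnn hk
    have hm : ∀ a : Int, PySem.Int.mod a 10 = a % 10 :=
      fun a => PySem.Int.mod_eq_emod_of_pos (by omega)
    have hf10 : ∀ a : Int, PySem.Int.floordiv a 10 = a / 10 :=
      fun a => PySem.Int.floordiv_eq_ediv_of_pos (by omega)
    have hf100 : ∀ a : Int, PySem.Int.floordiv a 100 = a / 100 :=
      fun a => PySem.Int.floordiv_eq_ediv_of_pos (by omega)
    by_cases h0 : num = 0
    · subst h0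
      rw [reto_2_aux]
      simp [reto_2_aux_alt, pvDigits_nonpos 0 (by omega), pvPairs]
    · have hpos : 0 < num := by omega
      have hrec : reto_2_aux (num / 100) = reto_2_aux_alt (num / 100) := by
        apply ih (num / 100).toNat (by omega) _ (by omega) rfl
      rw [reto_2_aux]
      simp only [hm, hf10, hf100]
      rw [if_neg h0, if_neg (by omega : ¬ num < 0)]
      by_cases h10 : num < 10
      · -- single digit: segundo = 0, num // 100 = 0, one unpaired digit on B's side
        have hd10 : num / 10 = 0 := by omega
        have h100 : num / 100 = 0 := by omega
        rw [if_pos (by rw [hd10]; rfl : num / 10 % 10 = 0), hrec, h100]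
        have hdig : pvDigits num = [num % 10] := by
          rw [pvDigits_pos num hpos, hm, hf10, hd10, pvDigits_nonpos 0 (by omega)]
        simp [reto_2_aux_alt, hdig, pvDigits_nonpos 0 (by omega), pvPairs]
      · -- at least two digits
        have hd1pos : 0 < num / 10 := by omega
        have hdig : pvDigits num = num % 10 :: (num / 10) % 10 :: pvDigits (num / 100) := by
          rw [pvDigits_pos num hpos, hm, hf10, pvDigits_pos _ hd1pos, hm, hf10]
          have : num / 10 / 10 = num / 100 := by omega
          rw [this]
        have halt : reto_2_aux_alt num =
            (((num / 10) % 10 == 0 || PySem.Int.mod (num % 10) ((num / 10) % 10) == 0) &&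
             reto_2_aux_alt (num / 100)) := by
          simp only [reto_2_aux_alt, hdig, pvPairs, List.all_cons]
        by_cases hseg : num / 10 % 10 = 0
        · rw [if_pos hseg, hrec, halt]
          simp [hseg]
        · rw [if_neg hseg]
          by_cases hdvd : PySem.Int.mod (num % 10) (num / 10 % 10) = 0
          · rw [if_pos hdvd, hrec, halt]
            simp [hdvd]
          · rw [if_neg hdvd, halt]
            simp [hdvd]
            intro h
            omega

-- ===== VERDICT (by name: the statement is the Claim_ definition above) =====
theorem reto_2_aux_spec : Claim_equal_reto_2_aux := by
  intro num _ hpre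
  unfold Spec_reto_2_aux
  exact pv_main num.toNat num hpre rfl
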